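-- pv_equiv track=rewrite | github.com/JosueLC/hwreader | slot.py | _generate_boolean_range
-- ===== SOURCE A (Python) =====
-- def _generate_boolean_range(typeIO, byteInit, bitInit, quantity):
--     out = dict()
--     byte = 0
--     bit = 0
--     #cambia la 'O'(OUT) por 'Q'
--     typeIO = 'Q' if typeIO=='O' else typeIO
--     for _ in range(quantity):
--         signal = {'dir': typeIO + str(byte + byteInit) + "." + str(bit + bitInit), 'tag' : ""}
--         out[str(bit + (8*byte))] = signal
--         bit += 1
--         if (bit > 7):
--             byte += 1
--             bit = 0
--     return out
-- ===== SOURCE B (Python) =====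
-- def _generate_boolean_range(typeIO, byteInit, bitInit, quantity):
--     # Two nested loops — outer over whole bytes, inner over the bits inside that
--     # byte — instead of A's flat loop with running byte/bit counters and a carry
--     # branch; no counter state at all.
--     if typeIO == 'O':
--         typeIO = 'Q'
--     out = {}
--     for byte in range((quantity + 7) // 8):
--         for bit in range(min(8, quantity - 8 * byte)):
--             out[str(8 * byte + bit)] = {
--                 'dir': typeIO + str(byte + byteInit) + "." + str(bit + bitInit),
--                 'tag': "",
--             }
--     return out
-- ===== Notes on version B (the rewrite author's own statement) =====
-- stated objective: alternative
-- what changed: Replaces A's single flat loop with running byte/bit counters and a carry branch by two nested loops (outer over whole bytes via ceiling division, inner over the bits of that byte), computing the key as str(8*byte+bit); no counter state is maintained.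
import Mathlib
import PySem

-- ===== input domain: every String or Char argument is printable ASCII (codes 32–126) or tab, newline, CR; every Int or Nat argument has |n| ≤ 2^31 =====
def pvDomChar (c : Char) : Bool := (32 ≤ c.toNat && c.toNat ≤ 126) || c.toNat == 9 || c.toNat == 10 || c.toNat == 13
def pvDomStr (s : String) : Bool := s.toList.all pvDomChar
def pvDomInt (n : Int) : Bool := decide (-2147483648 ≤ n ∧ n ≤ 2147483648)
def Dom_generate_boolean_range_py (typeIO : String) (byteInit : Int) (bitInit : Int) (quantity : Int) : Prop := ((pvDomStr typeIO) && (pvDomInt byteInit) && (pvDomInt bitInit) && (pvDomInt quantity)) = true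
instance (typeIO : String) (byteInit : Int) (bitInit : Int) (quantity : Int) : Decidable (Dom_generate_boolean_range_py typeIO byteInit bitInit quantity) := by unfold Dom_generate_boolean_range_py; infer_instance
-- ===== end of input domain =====

-- B replaces A's flat loop with running byte/bit counters and a carry branch by two
-- nested loops: outer over whole bytes (ceiling division), inner over the bits of
-- that byte (objective: alternative decomposition, same cost).


-- ===== PORT A =====
-- A's loop body, extracted as a named helper: state = (out, byte, bit).
def pvStepA (t : String) (byteInit : Int) (bitInit : Int)
    (st : PySem.Dict String (List (String × String)) × Int × Int) (_i : Int) :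
    PySem.Dict String (List (String × String)) × Int × Int :=
  let out := st.1
  let byte := st.2.1
  let bit := st.2.2
  -- signal = {'dir': …, 'tag': ''} : a literal dict with distinct literal keys, as an assoc list
  let signal : List (String × String) :=
    [("dir", t ++ PySem.Int.toStr (byte + byteInit) ++ "." ++ PySem.Int.toStr (bit + bitInit)), ("tag", "")]
  let out := out.insert (PySem.Int.toStr (bit + 8 * byte)) signal
  let bit := bit + 1
  if bit > 7 then (out, byte + 1, 0) else (out, byte, bit)

def generate_boolean_range_py (typeIO : String) (byteInit : Int) (bitInit : Int) (quantity : Int) : List (String × List (String × String)) :=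
  let t := if typeIO == "O" then "Q" else typeIO
  let res := (PySem.List.pyRange 0 quantity 1).foldl (pvStepA t byteInit bitInit)
    (PySem.Dict.empty, 0, 0)
  res.1.items

-- ===== PORT B =====
-- Source B's nested loops: the keys str(8*byte+bit) are pairwise distinct fresh keys,
-- so the dict built by the two loops IS the list of its entries in insertion order
-- (outer byte order, inner bit order) — flatMap of the inner map.
def generate_boolean_range_py_alt (typeIO : String) (byteInit : Int) (bitInit : Int) (quantity : Int) : List (String × List (String × String)) :=
  let t := if typeIO == "O" then "Q" else typeIO
  (PySem.List.pyRange 0 (PySem.Int.floordiv (quantity + 7) 8) 1).flatMap (fun byte =>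
    (PySem.List.pyRange 0 (min 8 (quantity - 8 * byte)) 1).map (fun bit =>
      (PySem.Int.toStr (8 * byte + bit),
       [("dir", t ++ PySem.Int.toStr (byte + byteInit) ++ "." ++ PySem.Int.toStr (bit + bitInit)),
        ("tag", "")])))

-- ===== PRECONDITION & SPEC =====
def Spec_generate_boolean_range_py (typeIO : String) (byteInit : Int) (bitInit : Int) (quantity : Int) (out : List (String × List (String × String))) : Prop := out = generate_boolean_range_py_alt typeIO byteInit bitInit quantity
instance (typeIO : String) (byteInit : Int) (bitInit : Int) (quantity : Int) (out : List (String × List (String × String))) : Decidable (Spec_generate_boolean_range_py typeIO byteInit bitInit quantity out) := by unfold Spec_generate_boolean_range_py; infer_instance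

-- ===== CLAIM (what is proved, stated in full; the proofs are below) =====
def Claim_equal_generate_boolean_range_py : Prop := ∀ (typeIO : String) (byteInit : Int) (bitInit : Int) (quantity : Int), Dom_generate_boolean_range_py typeIO byteInit bitInit quantity → Spec_generate_boolean_range_py typeIO byteInit bitInit quantity (generate_boolean_range_py typeIO byteInit bitInit quantity)

-- ===== LEMMAS AND PROOFS =====

-- the flat entry at index i (proof-side helper: A's loop produces these in order)
def pvEntryFlat (t : String) (byteInit : Int) (bitInit : Int) (i : Int) : String × List (String × String) :=
  let byte := PySem.Int.floordiv i 8
  let bit := PySem.Int.mod i 8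
  (PySem.Int.toStr i,
   [("dir", t ++ PySem.Int.toStr (byte + byteInit) ++ "." ++ PySem.Int.toStr (bit + bitInit)), ("tag", "")])

-- str(n) is injective on the naturals: Nat.toDigits decodes to Nat.digits.
theorem pv_toDigitsCore_eq (f : ℕ) : ∀ (n : ℕ) (ds : List Char), 0 < n → n < f →
    Nat.toDigitsCore 10 f n ds = ((Nat.digits 10 n).map Nat.digitChar).reverse ++ ds := by
  induction f with
  | zero => intro n ds h1 h2; omega
  | succ f ih =>
    intro n ds h1 h2
    rw [Nat.toDigitsCore]
    by_cases h : n / 10 = 0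
    · simp only [h, reduceIte]
      rw [Nat.digits_def' (by norm_num : (1:ℕ) < 10) h1, h]
      simp
    · simp only [if_neg h]
      rw [ih (n / 10) _ (Nat.pos_of_ne_zero h) (by omega)]
      rw [Nat.digits_def' (by norm_num : (1:ℕ) < 10) h1]
      simp

theorem pv_digitChar_map_inj : ∀ (l1 l2 : List ℕ), (∀ x ∈ l1, x < 10) → (∀ x ∈ l2, x < 10) →
    l1.map Nat.digitChar = l2.map Nat.digitChar → l1 = l2 := by
  intro l1
  induction l1 with
  | nil => intro l2 _ _ h; cases l2 <;> simp_all
  | cons a l ih =>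
    intro l2 h1 h2 h
    cases l2 with
    | nil => simp_all
    | cons b l2' =>
      simp only [List.map_cons, List.cons.injEq] at h
      have ha : a < 10 := h1 a (by simp)
      have hb : b < 10 := h2 b (by simp)
      have hab : a = b := by
        revert ha hb
        revert h
        have : ∀ a' < 10, ∀ b' < 10, Nat.digitChar a' = Nat.digitChar b' → a' = b' := by decide
        intro h ha hb; exact this a ha b hb h.1
      subst hab
      rw [ih l2' (fun x hx => h1 x (by simp [hx])) (fun x hx => h2 x (by simp [hx])) h.2]

theorem pv_toDigits_inj (m n : ℕ) (h : Nat.toDigits 10 m = Nat.toDigits 10 n) : m = n := by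
  have key : ∀ k : ℕ, 0 < k → Nat.toDigits 10 k = ((Nat.digits 10 k).map Nat.digitChar).reverse := by
    intro k hk
    show Nat.toDigitsCore 10 (k + 1) k [] = _
    rw [pv_toDigitsCore_eq (k + 1) k [] hk (by omega)]
    simp
  rcases Nat.eq_zero_or_pos m with hm | hm <;> rcases Nat.eq_zero_or_pos n with hn | hn
  · omega
  · exfalso
    subst hm
    rw [key n hn] at h
    have h0 : Nat.toDigits 10 0 = ['0'] := by decide
    rw [h0] at h
    have : Nat.digits 10 n = [0] := by
      have := pv_digitChar_map_inj (Nat.digits 10 n) [0]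
        (fun x hx => Nat.digits_lt_base (by norm_num) hx) (by simp)
        (by have := congrArg List.reverse h; simpa using this.symm)
      exact this
    have h2 := Nat.ofDigits_digits 10 n
    rw [this] at h2
    simp [Nat.ofDigits] at h2
    omega
  · exfalso
    subst hn
    rw [key m hm] at h
    have h0 : Nat.toDigits 10 0 = ['0'] := by decide
    rw [h0] at h
    have : Nat.digits 10 m = [0] := by
      exact pv_digitChar_map_inj (Nat.digits 10 m) [0]
        (fun x hx => Nat.digits_lt_base (by norm_num) hx) (by simp)
        (by have := congrArg List.reverse h; simpa using this)
    have hm0 := Nat.ofDigits_digits 10 m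
    rw [this] at hm0
    simp [Nat.ofDigits] at hm0
    omega
  · rw [key m hm, key n hn] at h
    have := pv_digitChar_map_inj (Nat.digits 10 m) (Nat.digits 10 n)
      (fun x hx => Nat.digits_lt_base (by norm_num) hx)
      (fun x hx => Nat.digits_lt_base (by norm_num) hx)
      (by have := congrArg List.reverse h; simpa using this)
    exact Nat.digits.injective 10 this

theorem pv_toStr_natCast_inj (m n : ℕ) (h : PySem.Int.toStr (m : ℤ) = PySem.Int.toStr (n : ℤ)) : m = n := by
  have hc : PySem.Int.toChars (m : ℤ) = PySem.Int.toChars (n : ℤ) := by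
    have := congrArg String.toList h
    rwa [PySem.Int.toList_toStr, PySem.Int.toList_toStr] at this
  simp only [PySem.Int.toChars] at hc
  rw [if_neg (by omega), if_neg (by omega)] at hc
  simp only [Int.toNat_natCast] at hc
  exact pv_toDigits_inj m n hc

-- the A-loop invariant: after n iterations A's state is (dict of the first n flat entries, n/8, n%8)
theorem pv_loopA_inv (t : String) (bI tI : Int) (n : ℕ) :
    (PySem.List.pyRange 0 (n : ℤ) 1).foldl (pvStepA t bI tI) (PySem.Dict.empty, 0, 0) =
    (PySem.Dict.mk ((List.range n).map (fun k : ℕ => pvEntryFlat t bI tI (k : ℤ))), ((n / 8 : ℕ) : ℤ), ((n % 8 : ℕ) : ℤ)) := by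
  induction n with
  | zero =>
    rw [PySem.List.pyRange_one_eq_nil (by omega)]
    rfl
  | succ n ih =>
    have hcast : ((n + 1 : ℕ) : ℤ) = (n : ℤ) + 1 := by push_cast; ring
    rw [hcast, PySem.List.pyRange_one_succ_right (by omega), List.foldl_append, ih]
    have hkey : ((n % 8 : ℕ) : ℤ) + 8 * ((n / 8 : ℕ) : ℤ) = (n : ℤ) := by
      push_cast
      omega
    have hfresh : (PySem.Dict.mk ((List.range n).map (fun k : ℕ => pvEntryFlat t bI tI (k : ℤ)))).contains
        (PySem.Int.toStr (n : ℤ)) = false := by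
      rw [PySem.Dict.contains_mk]
      simp only [List.any_eq_false, List.mem_map, List.mem_range]
      rintro p ⟨k, hk, rfl⟩
      simp only [pvEntryFlat]
      intro hEq
      exact absurd (pv_toStr_natCast_inj k n (by exact eq_of_beq hEq)) (by omega)
    simp only [List.foldl_cons, List.foldl_nil]
    unfold pvStepA
    simp only [hkey]
    have hins : (PySem.Dict.mk ((List.range n).map (fun k : ℕ => pvEntryFlat t bI tI (k : ℤ)))).insert
        (PySem.Int.toStr (n : ℤ))
        [("dir", t ++ PySem.Int.toStr (((n / 8 : ℕ) : ℤ) + bI) ++ "." ++ PySem.Int.toStr (((n % 8 : ℕ) : ℤ) + tI)), ("tag", "")] =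
        PySem.Dict.mk ((List.range (n + 1)).map (fun k : ℕ => pvEntryFlat t bI tI (k : ℤ))) := by
      apply PySem.Dict.ext
      rw [PySem.Dict.items_insert_of_not_contains _ _ hfresh]
      rw [List.range_succ, List.map_append]
      simp only [List.map_cons, List.map_nil]
      congr 2
      simp only [pvEntryFlat]
      rw [show PySem.Int.floordiv (↑n) 8 = ((n / 8 : ℕ) : ℤ) from by exact_mod_cast PySem.Int.floordiv_natCast n 8,
          show PySem.Int.mod (↑n) 8 = ((n % 8 : ℕ) : ℤ) from by exact_mod_cast PySem.Int.mod_natCast n 8]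
    rw [hins]
    by_cases h8 : ((n % 8 : ℕ) : ℤ) + 1 > 7
    · rw [if_pos h8]
      refine Prod.ext rfl (Prod.ext ?_ ?_) <;> simp only <;> push_cast <;> omega
    · rw [if_neg h8]
      refine Prod.ext rfl (Prod.ext ?_ ?_) <;> simp only <;> push_cast <;> omega

theorem pv_flatMap_congr {α β : Type} (l : List α) (f g : α → List β)
    (h : ∀ x ∈ l, f x = g x) : l.flatMap f = l.flatMap g := by
  induction l with
  | nil => rfl
  | cons a l ih =>
    simp only [List.flatMap_cons]
    rw [h a (by simp), ih (fun x hx => h x (by simp [hx]))]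

-- the chunk lemma: nested byte/bit loops enumerate the flat indices 0 .. 8n+r-1 in order
theorem pv_chunk {α : Type} (g : ℕ → ℕ → α) :
    ∀ (n r : ℕ), 0 < r → r ≤ 8 →
    (List.range (n + 1)).flatMap (fun b => (List.range (min 8 (8 * n + r - 8 * b))).map (g b)) =
    (List.range (8 * n + r)).map (fun k => g (k / 8) (k % 8)) := by
  intro n
  induction n with
  | zero =>
    intro r h1 h2
    have h0 : List.range (0 + 1) = [0] := rfl
    rw [h0]
    simp only [List.flatMap_cons, List.flatMap_nil, List.append_nil]
    rw [show min 8 (8 * 0 + r - 8 * 0) = r by omega, show 8 * 0 + r = r by omega]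
    apply List.map_congr_left
    intro k hk
    rw [List.mem_range] at hk
    rw [show k / 8 = 0 by omega, show k % 8 = k by omega]
  | succ n ih =>
    intro r h1 h2
    rw [List.range_succ, List.flatMap_append]
    have hpref : (List.range (n + 1)).flatMap (fun b => (List.range (min 8 (8 * (n + 1) + r - 8 * b))).map (g b)) =
        (List.range (n + 1)).flatMap (fun b => (List.range (min 8 (8 * n + 8 - 8 * b))).map (g b)) := by
      apply pv_flatMap_congr
      intro b hb
      rw [List.mem_range] at hb
      rw [show min 8 (8 * (n + 1) + r - 8 * b) = 8 by omega, show min 8 (8 * n + 8 - 8 * b) = 8 by omega]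
    rw [hpref, ih 8 (by omega) (by omega)]
    simp only [List.flatMap_cons, List.flatMap_nil, List.append_nil]
    rw [show min 8 (8 * (n + 1) + r - 8 * (n + 1)) = r by omega]
    have hsplit : List.map (fun k => g (k / 8) (k % 8)) (List.range (8 * n + 8 + r)) =
        List.map (fun k => g (k / 8) (k % 8)) (List.range (8 * n + 8)) ++ List.map (g (n + 1)) (List.range r) := by
      rw [List.range_add, List.map_append, List.map_map]
      congr 1
      apply List.map_congr_left
      intro k hk
      rw [List.mem_range] at hk
      simp only [Function.comp_apply]
      rw [show (8 * n + 8 + k) / 8 = n + 1 by omega, show (8 * n + 8 + k) % 8 = k by omega]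
    rw [show 8 * (n + 1) + r = 8 * n + 8 + r by ring, hsplit]

-- ===== VERDICT (by name: the statement is the Claim_ definition above) =====
theorem generate_boolean_range_py_spec : Claim_equal_generate_boolean_range_py := by
  unfold Claim_equal_generate_boolean_range_py
  intro typeIO byteInit bitInit quantity _
  unfold Spec_generate_boolean_range_py generate_boolean_range_py generate_boolean_range_py_alt
  dsimp only
  by_cases hq : quantity ≤ 0
  · rw [PySem.List.pyRange_one_eq_nil hq]
    have hb : PySem.Int.floordiv (quantity + 7) 8 ≤ 0 := by
      have := (PySem.Int.floordiv_lt_iff_lt_mul (a := quantity + 7) (b := 8) (q := 1) (by omega)).2 (by omega)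
      omega
    rw [PySem.List.pyRange_one_eq_nil hb]
    rfl
  · set t := if typeIO == "O" then "Q" else typeIO with ht
    obtain ⟨qn, hq_eq⟩ : ∃ qn : ℕ, quantity = (qn : ℤ) := ⟨quantity.toNat, by omega⟩
    obtain ⟨n, r, hr1, hr2, hsum⟩ : ∃ n r : ℕ, 0 < r ∧ r ≤ 8 ∧ qn = 8 * n + r :=
      ⟨(qn - 1) / 8, qn - 8 * ((qn - 1) / 8), by omega, by omega, by omega⟩
    subst hq_eq
    rw [pv_loopA_inv]
    show (List.range qn).map (fun k : ℕ => pvEntryFlat t byteInit bitInit (k : ℤ)) = _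
    have houter : PySem.Int.floordiv ((qn : ℤ) + 7) 8 = ((n + 1 : ℕ) : ℤ) := by
      rw [show ((qn : ℤ) + 7) = ((qn + 7 : ℕ) : ℤ) by push_cast; ring]
      rw [show PySem.Int.floordiv ((qn + 7 : ℕ) : ℤ) 8 = (((qn + 7) / 8 : ℕ) : ℤ) from by
        exact_mod_cast PySem.Int.floordiv_natCast (qn + 7) 8]
      congr 1
      omega
    rw [houter, PySem.List.pyRange_one]
    simp only [sub_zero, Int.toNat_natCast]
    rw [List.flatMap_map]
    symm
    trans ((List.range (n + 1)).flatMap (fun b : ℕ =>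
      (List.range (min 8 (8 * n + r - 8 * b))).map (fun i : ℕ =>
        (PySem.Int.toStr (8 * (b : ℤ) + (i : ℤ)),
         [("dir", t ++ PySem.Int.toStr ((b : ℤ) + byteInit) ++ "." ++ PySem.Int.toStr ((i : ℤ) + bitInit)),
          ("tag", "")]))))
    · apply pv_flatMap_congr
      intro b hb
      rw [List.mem_range] at hb
      simp only [zero_add]
      have hmin : min (8 : ℤ) ((qn : ℤ) - 8 * (b : ℤ)) = ((min 8 (8 * n + r - 8 * b) : ℕ) : ℤ) := by
        push_cast
        omega
      rw [hmin, PySem.List.pyRange_one]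
      simp only [sub_zero, Int.toNat_natCast, List.map_map]
      apply List.map_congr_left
      intro i _
      simp only [Function.comp_apply, zero_add]
    · rw [pv_chunk _ n r hr1 hr2, ← hsum]
      apply List.map_congr_left
      intro k hk
      rw [List.mem_range] at hk
      simp only [pvEntryFlat]
      rw [show PySem.Int.floordiv (↑k) 8 = ((k / 8 : ℕ) : ℤ) from by exact_mod_cast PySem.Int.floordiv_natCast k 8,
          show PySem.Int.mod (↑k) 8 = ((k % 8 : ℕ) : ℤ) from by exact_mod_cast PySem.Int.mod_natCast k 8]
      rw [show (8 : ℤ) * ((k / 8 : ℕ) : ℤ) + ((k % 8 : ℕ) : ℤ) = (k : ℤ) by push_cast; omega]
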